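-- pv_equiv track=rewrite | github.com/edt-yxz-zzd/txt_phone | lots/NOTE/design/外星语/平面网格二三语-count.py | f
-- ===== SOURCE A (Python) =====
-- import math as M
--
-- FF  = M.factorial
--
-- def CC(n, i):
--     if not 0 <= i <= n: return 0
--     return FF(n)//FF(i)//FF(n-i)
--
-- fd = {}
--
-- def f(n, u):
--     if u < 0: return 0
--     if n == 0: return 1
--     if n < 0: return 0
--     k = n, u
--     m = fd.get(k)
--     if m is not None: return m
--
--     r = sum(CC(u+i, i) * f( n-1-i, i) for i in range(0, n))
--     fd[k] = r
--     return r
-- ===== SOURCE B (Python) =====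
-- import math as M
--
-- FF = M.factorial
--
-- def CC(n, i):
--     if not 0 <= i <= n: return 0
--     return FF(n)//FF(i)//FF(n-i)
--
-- def f(n, u):
--     if u < 0: return 0
--     if n == 0: return 1
--     if n < 0: return 0
--     # factorial table 0..2n-1 (covers every binomial the rows need)
--     fact = [1]
--     for t in range(1, 2 * n):
--         fact.append(fact[-1] * t)
--     def C(a, b):  # == CC(a, b) for 0 <= b <= a < 2n
--         return fact[a] // fact[b] // fact[a - b]
--     # bottom-up: row m holds the values for first argument m at second
--     # arguments 0..n-1 (the only ones the recurrence ever consults)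
--     dp = [[1] * n]
--     for m in range(1, n):
--         dp.append([sum(C(v + i, i) * dp[m - 1 - i][i] for i in range(m))
--                    for v in range(n)])
--     # the queried cell, straight from the rows below it; CC(u+i, i) as a
--     # rising product (u+1)...(u+i) // i!, avoiding factorials of u
--     r = 0
--     for i in range(n):
--         p = 1
--         for t in range(i):
--             p *= u + t + 1
--         r += (p // fact[i]) * dp[n - 1 - i][i]
--     return r
-- ===== Notes on version B (the rewrite author's own statement) =====
-- stated objective: alternative
-- what changed: Replaced the memoized top-down recursion on a global cache with a forward bottom-up DP that fills rows 0..n-1 of the value table (columns 0..n-1, the only ones the recurrence consults) and reads the answer off those rows directly at the queried u.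
import Mathlib
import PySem

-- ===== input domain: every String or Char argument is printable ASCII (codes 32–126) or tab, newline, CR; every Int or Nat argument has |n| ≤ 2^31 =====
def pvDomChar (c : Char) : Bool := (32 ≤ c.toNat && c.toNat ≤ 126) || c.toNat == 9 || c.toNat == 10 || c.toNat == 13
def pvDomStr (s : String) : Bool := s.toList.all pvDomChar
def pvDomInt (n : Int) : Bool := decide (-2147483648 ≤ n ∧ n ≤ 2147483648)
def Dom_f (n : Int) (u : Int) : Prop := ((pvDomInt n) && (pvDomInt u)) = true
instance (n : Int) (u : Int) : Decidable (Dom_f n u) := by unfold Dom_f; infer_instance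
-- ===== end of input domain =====

-- B replaces A's memoized top-down recursion by a bottom-up DP that fills rows 0..n-1 of the
-- value table (columns 0..n-1, the only ones the recurrence consults) and reads the answer off
-- those rows directly at the queried u, with CC(u+i,i) as a rising product so no factorial of u
-- is ever formed (alternative decomposition, same values, no recursion, no cache).
-- A mutates a global memo dict `fd`; only the return value is claimed here (the memo only caches
-- values the recursion would recompute, so the port's per-call cache is value-equivalent).
-- Evaluation-speed notes on the ports (value-identical in both cases): math.factorial and dict
-- are C-speed intrinsics in Python, so the ports use a precomputed factorial table (exactly the
-- factorials FF computes) and a hash map for the memo to stay evaluable in the interpreter.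

-- ===== PORT A =====
-- table of the factorials 0!..(sz-1)! (FF's values, computed once up front)
def buildFact (sz : Nat) : Array Int :=
  (List.range sz).foldl (fun F j => F.push (if j = 0 then 1 else F.getD (j - 1) 1 * (j : Int))) #[]

-- CC reading FF's values off the table (same guard, same two floor divisions)
def CCt (F : Array Int) (n : Int) (i : Int) : Int :=
  if ¬ (0 ≤ i ∧ i ≤ n) then 0
  else PySem.Int.floordiv (PySem.Int.floordiv (F.getD n.toNat 0) (F.getD i.toNat 0)) (F.getD (n - i).toNat 0)

-- A's memoized recursion: n carried as a Nat plus structural fuel (every call keeps n < fuel, so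
-- the 0-fuel branch is unreachable); the memo dict fd is threaded through the sum's terms exactly
-- as Python's global fd is updated by the recursive calls, and written back at the end.
def fGoM : Nat → Array Int → Nat → Int → Std.HashMap (Int × Int) Int → Int × Std.HashMap (Int × Int) Int
  | 0, _, _, _, fd => (0, fd)
  | fuel + 1, F, n, u, fd =>
    if u < 0 then (0, fd)
    else if n = 0 then (1, fd)
    else
      match fd[((n : Int), u)]? with
      | some m => (m, fd)
      | none =>
        let r := (List.range n).foldl
          (fun (acc : Int × Std.HashMap (Int × Int) Int) (i : Nat) =>
            let p := fGoM fuel F (n - 1 - i) (i : Int) acc.2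
            (acc.1 + CCt F (u + (i : Int)) (i : Int) * p.1, p.2))
          (0, fd)
        (r.1, (r.2).insert ((n : Int), u) r.1)

def f (n : Int) (u : Int) : Int :=
  if u < 0 then 0
  else if n = 0 then 1
  else if n < 0 then 0
  else (fGoM (n.toNat + 1) (buildFact (u.toNat + 2 * n.toNat)) n.toNat u
    Std.HashMap.emptyWithCapacity).1

-- ===== PORT B =====
-- Source B's local C(a, b): table-read binomial, no guard (only called with 0 ≤ b ≤ a < table size)
def CB (F : Array Int) (a : Nat) (b : Nat) : Int :=
  PySem.Int.floordiv (PySem.Int.floordiv (F.getD a 0) (F.getD b 0)) (F.getD (a - b) 0)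

-- one new DP row: entry v is sum_{i<m} C(v+i,i) * dp[m-1-i][i]  (N columns)
def newRowB (F : Array Int) (dp : Array (Array Int)) (m : Nat) (N : Nat) : Array Int :=
  ((List.range N).map (fun (v : Nat) =>
    ((List.range m).map (fun (i : Nat) =>
      CB F (v + i) i * ((dp.getD (m - 1 - i) #[]).getD i 0))).sum)).toArray

-- rows 0..m of the DP table (row 0 is all ones), N columns each
def rowsB (F : Array Int) : Nat → Nat → Array (Array Int)
  | 0, N => #[Array.replicate N 1]
  | m + 1, N =>
    let dp := rowsB F m N
    dp.push (newRowB F dp (m + 1) N)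

def f_alt (n : Int) (u : Int) : Int :=
  if u < 0 then 0
  else if n = 0 then 1
  else if n < 0 then 0
  else
    let N := n.toNat
    let F := buildFact (2 * N)
    let dp := rowsB F (N - 1) N
    ((List.range N).map (fun (i : Nat) =>
      PySem.Int.floordiv ((List.range i).foldl (fun p (t : Nat) => p * (u + (t : Int) + 1)) 1) (F.getD i 0) *
        ((dp.getD (N - 1 - i) #[]).getD i 0))).sum

-- ===== PRECONDITION & SPEC =====
-- Pre_ excludes exactly the inputs on which the Python A raises: for u ≥ 0 the recursion has
-- depth n at 2 interpreter frames per level, so from n = 496 (measured: 495 returns, 496 raises)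
-- A hits CPython's default 1000-frame recursion limit and raises RecursionError.
def Pre_f (n : Int) (u : Int) : Prop := u < 0 ∨ n ≤ 495
instance (n : Int) (u : Int) : Decidable (Pre_f n u) := by unfold Pre_f; infer_instance
def pvWitness_f : Int × Int := (7, 3)

def Spec_f (n : Int) (u : Int) (out : Int) : Prop := out = f_alt n u
instance (n : Int) (u : Int) (out : Int) : Decidable (Spec_f n u out) := by unfold Spec_f; infer_instance

-- ===== CLAIM (what is proved, stated in full; the proofs are below) =====
def Claim_equal_f : Prop := ∀ (n : Int) (u : Int), Dom_f n u → Pre_f n u → Spec_f n u (f n u)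

-- ===== LEMMAS AND PROOFS =====

-- math.factorial (A only ever calls it with a nonnegative argument) and A's CC as written in
-- Python (`//` is PySem.Int.floordiv): the reference forms the table-reading ports are proved
-- against
def FF (n : Int) : Int := Int.ofNat (Nat.factorial n.toNat)

def CC (n : Int) (i : Int) : Int :=
  if ¬ (0 ≤ i ∧ i ≤ n) then 0
  else PySem.Int.floordiv (PySem.Int.floordiv (FF n) (FF i)) (FF (n - i))

-- pure (memo-free, table-free) reference recursion, used only by the proofs
def fGo : Nat → Nat → Int → Int
  | 0, _, _ => 0
  | fuel + 1, n, u =>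
    if u < 0 then 0
    else if n = 0 then 1
    else ((List.range n).map (fun (i : Nat) =>
      CC (u + (i : Int)) (i : Int) * fGo fuel (n - 1 - i) (i : Int))).sum

theorem fGo_fuel : ∀ (fuel fuel' n : Nat) (u : Int), n < fuel → n < fuel' →
    fGo fuel n u = fGo fuel' n u := by
  intro fuel
  induction fuel with
  | zero => intro fuel' n u hn hn'; omega
  | succ fl ih =>
    intro fuel' n u hn hn'
    cases fuel' with
    | zero => omega
    | succ f' =>
      simp only [fGo]
      by_cases hu : u < 0
      · simp [hu]
      · by_cases h0 : n = 0
        · simp [h0]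
        · simp only [hu, h0, if_false]
          congr 1
          apply List.map_congr_left
          intro i hi
          have hi' : i < n := List.mem_range.mp hi
          congr 1
          exact ih f' (n - 1 - i) i (by omega) (by omega)

-- the factorial table is FF's values
theorem agetD {α : Type} (a : Array α) (i : Nat) (d : α) : a.getD i d = (a[i]?).getD d := by
  unfold Array.getD
  split
  · rename_i h; rw [Array.getElem?_eq_getElem h]; rfl
  · rename_i h; rw [Array.getElem?_eq_none (by omega)]; rfl

theorem buildFact_step (k : Nat) : buildFact (k + 1) = (buildFact k).push
    (if k = 0 then 1 else (buildFact k).getD (k - 1) 1 * (k : Int)) := by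
  unfold buildFact
  rw [List.range_succ, List.foldl_append]
  rfl

theorem buildFact_size (sz : Nat) : (buildFact sz).size = sz := by
  induction sz with
  | zero => simp [buildFact]
  | succ k ih => rw [buildFact_step, Array.size_push, ih]

theorem buildFact_getD' : ∀ (sz j : Nat) (d : Int), j < sz →
    (buildFact sz).getD j d = Int.ofNat (Nat.factorial j) := by
  intro sz
  induction sz with
  | zero => intro j d h; omega
  | succ k ih =>
    intro j d h
    rw [buildFact_step, agetD, Array.getElem?_push]
    rw [buildFact_size]
    rcases Nat.lt_or_ge j k with hj | hj
    · rw [if_neg (by omega)]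
      rw [← agetD]
      exact ih j d hj
    · have hjk : j = k := by omega
      subst hjk
      rw [if_pos rfl]
      by_cases h0 : j = 0
      · simp [h0]
      · have hk1 : j - 1 < j := by omega
        simp only [Option.getD_some, if_neg h0]
        rw [ih (j - 1) 1 hk1]
        have h1 : j = (j - 1) + 1 := by omega
        conv_rhs => rw [h1, Nat.factorial_succ]
        simp only [Int.ofNat_eq_natCast]
        push_cast
        have hc : ((j - 1 : Nat) : Int) + 1 = (j : Int) := by omega
        rw [hc]
        ring

theorem buildFact_getD (sz j : Nat) (h : j < sz) :
    (buildFact sz).getD j 0 = Int.ofNat (Nat.factorial j) :=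
  buildFact_getD' sz j 0 h

theorem CCt_eq (sz : Nat) (n i : Int) (hn : n.toNat < sz) :
    CCt (buildFact sz) n i = CC n i := by
  unfold CCt CC
  by_cases hg : ¬ (0 ≤ i ∧ i ≤ n)
  · simp [hg]
  · push_neg at hg
    rw [if_neg (by push_neg; omega), if_neg (by push_neg; omega)]
    rw [buildFact_getD sz n.toNat hn, buildFact_getD sz i.toNat (by omega),
        buildFact_getD sz (n - i).toNat (by omega)]
    unfold FF
    rfl

-- the memo is correct: every stored value is the pure recursion's value at its key
def Good (fd : Std.HashMap (Int × Int) Int) : Prop :=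
  ∀ (k : Int × Int) (v : Int), fd[k]? = some v → v = fGo (k.1.toNat + 1) k.1.toNat k.2

theorem good_empty : Good Std.HashMap.emptyWithCapacity := by
  intro k v h
  simp at h

theorem fGoM_correct (sz : Nat) : ∀ (fuel n : Nat) (u : Int) (fd : Std.HashMap (Int × Int) Int),
    n < fuel → (u < 0 ∨ u.toNat + n ≤ sz) → Good fd →
    (fGoM fuel (buildFact sz) n u fd).1 = fGo (n + 1) n u ∧
      Good (fGoM fuel (buildFact sz) n u fd).2 := by
  intro fuel
  induction fuel with
  | zero => intro n u fd hn _ _; omega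
  | succ fl ih =>
    intro n u fd hn hsz hGood
    simp only [fGoM]
    by_cases hu : u < 0
    · simp only [hu, if_true]
      exact ⟨by simp [fGo, hu], hGood⟩
    · by_cases h0 : n = 0
      · simp only [hu, if_false, h0, if_true]
        exact ⟨by simp [fGo, hu], by simpa [h0] using hGood⟩
      · simp only [hu, h0, if_false]
        have husz : u.toNat + n ≤ sz := by omega
        cases hm : (fd[((n : Int), u)]?) with
        | some m =>
          refine ⟨?_, hGood⟩
          have := hGood _ _ hm
          simpa using this
        | none =>
          have hfold : ∀ (l : List Nat) (acc : Int × Std.HashMap (Int × Int) Int),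
              (∀ i ∈ l, i < n) → Good acc.2 →
              (l.foldl (fun (acc : Int × Std.HashMap (Int × Int) Int) (i : Nat) =>
                  let p := fGoM fl (buildFact sz) (n - 1 - i) (i : Int) acc.2
                  (acc.1 + CCt (buildFact sz) (u + (i : Int)) (i : Int) * p.1, p.2)) acc).1
                = acc.1 + (l.map (fun (i : Nat) =>
                    CC (u + (i : Int)) (i : Int) * fGo (n - 1 - i + 1) (n - 1 - i) (i : Int))).sum
              ∧ Good ((l.foldl (fun (acc : Int × Std.HashMap (Int × Int) Int) (i : Nat) =>
                  let p := fGoM fl (buildFact sz) (n - 1 - i) (i : Int) acc.2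
                  (acc.1 + CCt (buildFact sz) (u + (i : Int)) (i : Int) * p.1, p.2)) acc).2) := by
            intro l
            induction l with
            | nil => intro acc _ hacc; exact ⟨by simp, hacc⟩
            | cons i t iht =>
              intro acc hmem hacc
              have hi : i < n := hmem i (List.mem_cons_self ..)
              have hrec := ih (n - 1 - i) (i : Int) acc.2 (by omega)
                (Or.inr (by simp; omega)) hacc
              have hstep := iht (acc.1 + CCt (buildFact sz) (u + (i : Int)) (i : Int) *
                  (fGoM fl (buildFact sz) (n - 1 - i) (i : Int) acc.2).1,
                  (fGoM fl (buildFact sz) (n - 1 - i) (i : Int) acc.2).2)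
                (fun j hj => hmem j (List.mem_cons_of_mem _ hj)) hrec.2
              simp only [List.foldl_cons, List.map_cons, List.sum_cons]
              refine ⟨?_, hstep.2⟩
              rw [hstep.1, hrec.1]
              rw [CCt_eq sz (u + (i : Int)) (i : Int) (by omega)]
              ring
          have hr := hfold (List.range n) (0, fd) (fun i hi => List.mem_range.mp hi) hGood
          have hval : ((List.range n).foldl (fun (acc : Int × Std.HashMap (Int × Int) Int) (i : Nat) =>
                  let p := fGoM fl (buildFact sz) (n - 1 - i) (i : Int) acc.2
                  (acc.1 + CCt (buildFact sz) (u + (i : Int)) (i : Int) * p.1, p.2)) (0, fd)).1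
              = fGo (n + 1) n u := by
            rw [hr.1]
            have hrhs : fGo (n + 1) n u = ((List.range n).map (fun (i : Nat) =>
                CC (u + (i : Int)) (i : Int) * fGo n (n - 1 - i) (i : Int))).sum := by
              simp [fGo, hu, h0]
            rw [hrhs, zero_add]
            apply congrArg
            apply List.map_congr_left
            intro i hi
            have hi' : i < n := List.mem_range.mp hi
            congr 1
            exact fGo_fuel _ _ _ _ (by omega) (by omega)
          refine ⟨hval, ?_⟩
          intro k v hk
          rw [Std.HashMap.getElem?_insert] at hk
          by_cases hkeq : ((n : Int), u) == k
          · simp only [hkeq, if_true] at hk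
            cases hk
            have hkeq' : ((n : Int), u) = k := by
              simpa using hkeq
            subst hkeq'
            simpa using hval
          · simp only [hkeq] at hk
            exact hr.2 k v hk

-- B-side helpers
theorem getD_map_range {α : Type} (g : Nat → α) (N v : Nat) (d : α) (h : v < N) :
    ((List.range N).map g).getD v d = g v := by
  simp [List.getD, List.getElem?_map, List.getElem?_range h]

theorem rowsB_size (F : Array Int) (m N : Nat) : (rowsB F m N).size = m + 1 := by
  induction m with
  | zero => simp [rowsB]
  | succ k ih => simp [rowsB, ih]

theorem rowsB_getD_stable (F : Array Int) (m N j : Nat) (hj : j ≤ m) :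
    (rowsB F (m + 1) N).getD j #[] = (rowsB F m N).getD j #[] := by
  have hlen : j < (rowsB F m N).size := by rw [rowsB_size]; omega
  simp only [rowsB]
  rw [agetD, Array.getElem?_push, rowsB_size, if_neg (by omega), ← agetD]

theorem getD_toArray {α : Type} (l : List α) (j : Nat) (d : α) :
    (l.toArray).getD j d = l.getD j d := by
  rw [agetD]
  simp [List.getD]

-- Source B's C agrees with A's CC on the in-range arguments
theorem CB_eq (sz a b : Nat) (hb : b ≤ a) (ha : a < sz) :
    CB (buildFact sz) a b = CC ((a : Nat) : Int) ((b : Nat) : Int) := by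
  unfold CB CC
  rw [if_neg (by push_neg; constructor <;> [omega; exact_mod_cast hb])]
  rw [buildFact_getD sz a ha]
  have h1 : ((a : Nat) : Int).toNat = a := by omega
  have h2 : ((b : Nat) : Int).toNat = b := by omega
  have h3 : (((a : Nat) : Int) - ((b : Nat) : Int)).toNat = a - b := by omega
  unfold FF
  rw [h1, h2, h3, buildFact_getD sz b (by omega), buildFact_getD sz (a - b) (by omega)]

theorem rowsB_correct (sz : Nat) : ∀ (m N j v : Nat), m + 1 ≤ N → N + N ≤ sz + 1 → j ≤ m → v < N →
    ((rowsB (buildFact sz) m N).getD j #[]).getD v 0 = fGo (j + 1) j ((v : Nat) : Int) := by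
  intro m
  induction m with
  | zero =>
    intro N j v hN hsz hj hv
    interval_cases j
    simp only [rowsB]
    rw [agetD]
    simp [fGo, hv]
  | succ k ih =>
    intro N j v hN hsz hj hv
    rcases Nat.lt_or_ge j (k + 1) with hlt | hge
    · rw [rowsB_getD_stable (buildFact sz) k N j (by omega)]
      exact ih N j v (by omega) (by omega) (by omega) hv
    · have hj' : j = k + 1 := by omega
      subst hj'
      have hlen : (rowsB (buildFact sz) k N).size = k + 1 := rowsB_size _ k N
      have hrow : (rowsB (buildFact sz) (k + 1) N).getD (k + 1) #[]
          = newRowB (buildFact sz) (rowsB (buildFact sz) k N) (k + 1) N := by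
        simp only [rowsB]
        rw [agetD, Array.getElem?_push, hlen, if_pos rfl]
        rfl
      rw [hrow]
      simp only [newRowB]
      rw [getD_toArray, getD_map_range _ _ _ _ hv]
      have hrhs : fGo (k + 1 + 1) (k + 1) ((v : Nat) : Int) =
          if ((v : Nat) : Int) < 0 then 0
          else if k + 1 = 0 then 1
          else ((List.range (k + 1)).map
            (fun (i : Nat) => CC (((v : Nat) : Int) + (i : Int)) (i : Int) *
              fGo (k + 1) (k + 1 - 1 - i) (i : Int))).sum := rfl
      rw [hrhs]
      have hvnn : ¬ (((v : Nat) : Int) < 0) := by omega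
      simp only [hvnn, if_false, Nat.succ_ne_zero, if_false]
      congr 1
      apply List.map_congr_left
      intro i hi
      have hi' : i < k + 1 := List.mem_range.mp hi
      have hcb := CB_eq sz (v + i) i (by omega) (by omega)
      rw [hcb]
      have hcast : (((v + i : Nat) : Nat) : Int) = ((v : Nat) : Int) + (i : Int) := by push_cast; ring
      rw [hcast]
      congr 1
      rw [ih N (k + 1 - 1 - i) i (by omega) (by omega) (by omega) (by omega)]
      exact fGo_fuel _ _ _ _ (by omega) (by omega)

-- the rising product (u+1)⋯(u+i) is the descending factorial of u+i
theorem prodAsc_eq (a : Nat) : ∀ (i : Nat),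
    (List.range i).foldl (fun p (t : Nat) => p * (((a : Nat) : Int) + (t : Int) + 1)) 1
      = Int.ofNat ((a + i).descFactorial i) := by
  intro i
  induction i with
  | zero => simp
  | succ k ih =>
    rw [List.range_succ, List.foldl_append, List.foldl_cons, List.foldl_nil, ih]
    have : a + (k + 1) = (a + k) + 1 := by omega
    rw [this, Nat.succ_descFactorial_succ]
    simp only [Int.ofNat_eq_natCast]
    push_cast
    ring

-- CC(u+i, i) computed as the rising product over i! (Source B's last loop)
theorem prodAsc_div_eq_CC (u : Int) (hu : 0 ≤ u) (i : Nat) :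
    PySem.Int.floordiv ((List.range i).foldl (fun p (t : Nat) => p * (u + (t : Int) + 1)) 1)
        (Int.ofNat (Nat.factorial i))
      = CC (u + (i : Int)) (i : Int) := by
  have ha : u = ((u.toNat : Nat) : Int) := by omega
  set a := u.toNat with hadef
  rw [ha, prodAsc_eq a i]
  have hCC : CC (((a : Nat) : Int) + (i : Int)) (i : Int)
      = Int.ofNat ((a + i).choose i) := by
    unfold CC
    rw [if_neg (by push_neg; omega)]
    unfold FF
    have h1 : (((a : Nat) : Int) + (i : Int)).toNat = a + i := by omega
    have h2 : ((i : Nat) : Int).toNat = i := by omega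
    have h3 : ((((a : Nat) : Int) + (i : Int)) - (i : Int)).toNat = a := by omega
    rw [h1, h2, h3]
    rw [show (Int.ofNat (Nat.factorial (a + i)) : Int) = (((Nat.factorial (a + i)) : Nat) : Int) from rfl]
    rw [show (Int.ofNat (Nat.factorial i) : Int) = (((Nat.factorial i) : Nat) : Int) from rfl]
    rw [show (Int.ofNat (Nat.factorial a) : Int) = (((Nat.factorial a) : Nat) : Int) from rfl]
    rw [PySem.Int.floordiv_natCast, PySem.Int.floordiv_natCast]
    have hsub : a + i - a = i := by omega
    have hd1 : Nat.factorial (a + i) / Nat.factorial i = (a + i).descFactorial a := by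
      rw [Nat.descFactorial_eq_div (by omega), hsub]
    rw [hd1]
    have hd2 : (a + i).descFactorial a / Nat.factorial a = (a + i).choose a :=
      (Nat.choose_eq_descFactorial_div_factorial _ _).symm
    rw [hd2]
    have hsymm : (a + i).choose a = (a + i).choose i := by
      have := Nat.choose_symm (n := a + i) (k := i) (by omega)
      simpa [show a + i - i = a from by omega] using this
    rw [hsymm]
    rfl
  rw [hCC]
  rw [show (Int.ofNat ((a + i).descFactorial i) : Int) = ((((a + i).descFactorial i) : Nat) : Int) from rfl]
  rw [show (Int.ofNat (Nat.factorial i) : Int) = (((Nat.factorial i) : Nat) : Int) from rfl]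
  rw [PySem.Int.floordiv_natCast]
  rw [← Nat.choose_eq_descFactorial_div_factorial]
  rfl

-- ===== VERDICT (by name: the statement is the Claim_ definition above) =====
theorem f_spec : Claim_equal_f := by
  unfold Claim_equal_f Spec_f
  intro n u _ _
  unfold f f_alt
  by_cases hu : u < 0
  · simp [hu]
  · by_cases h0 : n = 0
    · simp [h0]
    · by_cases hneg : n < 0
      · simp [hu, h0, hneg]
      · simp only [hu, h0, hneg, if_false]
        have hn1 : 1 ≤ n.toNat := by omega
        have hA : (fGoM (n.toNat + 1) (buildFact (u.toNat + 2 * n.toNat)) n.toNat u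
            Std.HashMap.emptyWithCapacity).1 = fGo (n.toNat + 1) n.toNat u :=
          (fGoM_correct (u.toNat + 2 * n.toNat) (n.toNat + 1) n.toNat u
            Std.HashMap.emptyWithCapacity (by omega) (Or.inr (by omega)) good_empty).1
        rw [hA]
        have hN0 : ¬ (n.toNat = 0) := by omega
        have hrhs : fGo (n.toNat + 1) n.toNat u = ((List.range n.toNat).map
            (fun (i : Nat) => CC (u + (i : Int)) (i : Int) *
              fGo n.toNat (n.toNat - 1 - i) (i : Int))).sum := by
          simp [fGo, hu, hN0]
        rw [hrhs]
        apply congrArg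
        apply List.map_congr_left
        intro i hi
        have hi' : i < n.toNat := List.mem_range.mp hi
        rw [buildFact_getD (2 * n.toNat) i (by omega)]
        rw [prodAsc_div_eq_CC u (by omega) i]
        congr 1
        rw [rowsB_correct (2 * n.toNat) (n.toNat - 1) n.toNat (n.toNat - 1 - i) i
          (by omega) (by omega) (by omega) (by omega)]
        exact fGo_fuel _ _ _ _ (by omega) (by omega)
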